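-- pv_equiv track=rewrite | github.com/nsms556/programmers | 64061.py | solution
-- ===== SOURCE A (Python) =====
-- def rotate(x) :
--     return list(zip(*x[::-1]))
--
-- def solution(board, moves):
--     answer = 0
--
--     board = list(map(list, rotate(board)))
--
--     for i in range(len(board)) :
--         board[i] = [k for k in board[i] if k > 0]
--
--     pick = []
--
--     for m in moves :
--         if len(board[m-1]) > 0 :
--             pick.append(board[m-1].pop())
--         else :
--             continue
--
--         if len(pick) > 1 :
--             if pick[-2] == pick[-1] :
--                 pick.pop()
--                 pick.pop()
--                 answer += 2
--
--     return answer
-- ===== SOURCE B (Python) =====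
-- def solution(board, moves):
--     # works on a mutable copy of the board (the argument is not mutated)
--     grid = [list(row) for row in board]
--     stack = []
--     answer = 0
--     for m in moves:
--         for row in grid:
--             if row[m - 1] > 0:
--                 v = row[m - 1]
--                 row[m - 1] = 0
--                 if stack and stack[-1] == v:
--                     stack.pop()
--                     answer += 2
--                 else:
--                     stack.append(v)
--                 break
--     return answer
-- ===== Notes on version B (the rewrite author's own statement) =====
-- stated objective: alternative
-- what changed: B drops A's rotate-the-board-and-prefilter-zeros preprocessing entirely: it works on a mutable copy of the board as given and, for each move, scans column m-1 top-down for the first positive cell, zeroes it and feeds it to the pair-cancellation stack; Pre_ excludes non-rectangular boards, an unspecified corner where A's zip-rotation truncates ragged rows to the shortest width while B reads each row as given (both defensible), and moves whose index is outside the column range (A raises IndexError there).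
-- outside the precondition, e.g. on solution([[5, 2], [2]], [0, 0]): A returns 0, B returns 2; on solution([[2, 1], [2]], [0, 0]): A returns 2, B returns 0
import Mathlib
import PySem

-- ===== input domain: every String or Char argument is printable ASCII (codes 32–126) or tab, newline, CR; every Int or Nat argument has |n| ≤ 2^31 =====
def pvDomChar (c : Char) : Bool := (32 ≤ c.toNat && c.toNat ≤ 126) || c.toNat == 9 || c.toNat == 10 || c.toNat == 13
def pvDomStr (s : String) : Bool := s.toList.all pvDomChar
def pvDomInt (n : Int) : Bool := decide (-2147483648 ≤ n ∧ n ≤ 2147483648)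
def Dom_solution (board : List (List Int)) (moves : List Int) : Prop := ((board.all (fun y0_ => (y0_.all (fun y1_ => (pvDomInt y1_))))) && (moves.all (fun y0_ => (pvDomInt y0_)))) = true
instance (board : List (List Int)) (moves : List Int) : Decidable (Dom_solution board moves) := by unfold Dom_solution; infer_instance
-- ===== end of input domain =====

-- B drops A's rotate-and-prefilter preprocessing and instead scans the chosen column of a
-- copy of the board top-down for the first positive cell (objective: alternative, same cost).

-- number of columns = minimal row length (what zip(*rows) truncates to); used by both ports and Pre_
def widthOf : List (List Int) → Nat
  | [] => 0
  | [r] => r.length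
  | r :: rs => min r.length (widthOf rs)

-- ===== PORT A =====
-- rotate(x) = list(zip(*x[::-1])) : the columns of x[::-1], truncated to the shortest row
def pyRotate (x : List (List Int)) : List (List Int) :=
  (List.range (widthOf x.reverse)).map (fun j => x.reverse.map (fun r => r.getD j 0))

-- body of A's 'for m in moves' loop over the state (board, pick, answer)
def stepA (st : List (List Int) × List Int × Int) (m : Int) : List (List Int) × List Int × Int :=
  match PySem.List.pyGet? st.1 (m - 1) with
  | none => st   -- board[m-1] raises IndexError; excluded by Pre_
  | some col =>
    if col.length > 0 then
      let v := PySem.List.pyGetD col (-1) 0                     -- board[m-1].pop() : value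
      let bd' := PySem.List.pySetD st.1 (m - 1) col.dropLast    -- board[m-1].pop() : mutation
      let pick' := st.2.1 ++ [v]
      if pick'.length > 1 ∧ PySem.List.pyGetD pick' (-2) 0 = PySem.List.pyGetD pick' (-1) 0 then
        (bd', pick'.dropLast.dropLast, st.2.2 + 2)
      else (bd', pick', st.2.2)
    else st

def solution (board : List (List Int)) (moves : List Int) : Int :=
  let b := (pyRotate board).map (fun row => row.filter (fun k => decide (k > 0)))
  (moves.foldl stepA (b, ([], 0))).2.2

-- ===== PORT B =====
-- B's inner 'for row in grid' loop: find the first row with row[m-1] > 0, zero that cell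
-- (row[m-1] via pyGet?; none = IndexError, excluded by Pre_) and return the picked value
def scanPick (rows : List (List Int)) (i : Int) : Option Int × List (List Int) :=
  match rows with
  | [] => (none, [])
  | r :: rs =>
    if 0 < (PySem.List.pyGet? r i).getD 0 then
      (some ((PySem.List.pyGet? r i).getD 0), PySem.List.pySetD r i 0 :: rs)
    else
      let p := scanPick rs i
      (p.1, r :: p.2)

-- body of B's 'for m in moves' loop over the state (grid, stack, answer)
def stepB (st : List (List Int) × List Int × Int) (m : Int) :
    List (List Int) × List Int × Int :=
  let p := scanPick st.1 (m - 1)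
  match p.1 with
  | none => (p.2, st.2.1, st.2.2)
  | some v =>
    if st.2.1 ≠ [] ∧ PySem.List.pyGetD st.2.1 (-1) 0 = v then
      (p.2, st.2.1.dropLast, st.2.2 + 2)
    else (p.2, st.2.1 ++ [v], st.2.2)

def solution_alt (board : List (List Int)) (moves : List Int) : Int :=
  let grid := board.map (fun r => r)   -- grid = [list(row) for row in board]
  (moves.foldl stepB (grid, ([], 0))).2.2

-- ===== PRECONDITION & SPEC =====
-- When moves is nonempty, Pre_ excludes non-rectangular boards (a crane-game board is
-- rectangular; on ragged ones A's zip-rotation truncates rows to the shortest width while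
-- B reads each row as given, both defensible readings of an unspecified corner) and moves
-- whose index m-1 is outside the column range (A raises IndexError there).
def Pre_solution (board : List (List Int)) (moves : List Int) : Prop :=
  ∀ m ∈ moves, board ≠ [] ∧ ∀ r ∈ board,
    r.length = (board.headD []).length ∧
    -((r.length : Int)) ≤ m - 1 ∧ m - 1 < (r.length : Int)
instance (board : List (List Int)) (moves : List Int) : Decidable (Pre_solution board moves) := by
  unfold Pre_solution; infer_instance

def pvWitness_solution : List (List Int) × List Int := ([[1, 2], [3, 2]], [1, 2, 2])

def Spec_solution (board : List (List Int)) (moves : List Int) (out : Int) : Prop := out = solution_alt board moves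
instance (board : List (List Int)) (moves : List Int) (out : Int) : Decidable (Spec_solution board moves out) := by unfold Spec_solution; infer_instance

-- ===== CLAIM (what is proved, stated in full; the proofs are below) =====
def Claim_equal_solution : Prop := ∀ (board : List (List Int)) (moves : List Int), Dom_solution board moves → Pre_solution board moves → Spec_solution board moves (solution board moves)

-- ===== LEMMAS AND PROOFS =====

def posF (c : List Int) : List Int := c.filter (fun k => decide (k > 0))

def colOf (g : List (List Int)) (j : Nat) : List Int := g.map (fun r => r.getD j 0)

-- proof-side restatement of B's inner loop with a plain Nat column index
def zeroFirst (rows : List (List Int)) (j : Nat) : Option Int × List (List Int) :=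
  match rows with
  | [] => (none, [])
  | r :: rs =>
    if 0 < r.getD j 0 then (some (r.getD j 0), r.set j 0 :: rs)
    else
      let p := zeroFirst rs j
      (p.1, r :: p.2)

-- the invariant tying A's prefiltered column stacks to B's mutable rectangular grid
def StateRel (w : Nat) (bd grid : List (List Int)) : Prop :=
  bd.length = w ∧ (∀ r ∈ grid, r.length = w) ∧
    ∀ j < w, bd.getD j [] = (posF (colOf grid j)).reverse

lemma widthOf_cons₂ (r r' : List Int) (rs : List (List Int)) :
    widthOf (r :: r' :: rs) = min r.length (widthOf (r' :: rs)) := rfl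

lemma colOf_cons (r : List Int) (rs : List (List Int)) (j : Nat) :
    colOf (r :: rs) j = r.getD j 0 :: colOf rs j := rfl

lemma zeroFirst_cons (r : List Int) (rs : List (List Int)) (j : Nat) :
    zeroFirst (r :: rs) j =
      if 0 < r.getD j 0 then (some (r.getD j 0), r.set j 0 :: rs)
      else ((zeroFirst rs j).1, r :: (zeroFirst rs j).2) := rfl

lemma posF_cons_pos {a : Int} (c : List Int) (h : 0 < a) : posF (a :: c) = a :: posF c := by
  simp [posF, h]

lemma posF_cons_nonpos {a : Int} (c : List Int) (h : ¬ 0 < a) : posF (a :: c) = posF c := by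
  simp [posF, h]

lemma widthOf_append_singleton (l : List (List Int)) (a : List Int) (h : l ≠ []) :
    widthOf (l ++ [a]) = min (widthOf l) a.length := by
  induction l with
  | nil => simp at h
  | cons r rs ih =>
    cases rs with
    | nil => rfl
    | cons r' rs' =>
      simp only [List.cons_append]
      rw [widthOf_cons₂, widthOf_cons₂]
      have ih' := ih (by simp)
      simp only [List.cons_append] at ih'
      rw [ih']
      omega

lemma widthOf_reverse (l : List (List Int)) : widthOf l.reverse = widthOf l := by
  induction l with
  | nil => rfl
  | cons r rs ih =>
    cases rs with
    | nil => rfl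
    | cons r' rs' =>
      rw [List.reverse_cons, widthOf_append_singleton _ _ (by simp), ih, widthOf_cons₂]
      omega

lemma zeroFirst_none {rows : List (List Int)} {j : Nat}
    (h : posF (colOf rows j) = []) : zeroFirst rows j = (none, rows) := by
  induction rows with
  | nil => rfl
  | cons r rs ih =>
    rw [colOf_cons] at h
    by_cases hp : 0 < r.getD j 0
    · rw [posF_cons_pos _ hp] at h
      simp at h
    · rw [posF_cons_nonpos _ hp] at h
      rw [zeroFirst_cons, if_neg hp, ih h]

lemma getD_set_self (r : List Int) (j : Nat) : (r.set j 0).getD j 0 = 0 := by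
  by_cases h : j < r.length
  · simp [List.getD_eq_getElem?_getD, List.getElem?_set_self h]
  · simp [List.getD_eq_getElem?_getD,
      List.getElem?_eq_none (by simp; omega : (r.set j 0).length ≤ j)]

lemma zeroFirst_pos {rows : List (List Int)} {j : Nat} {v : Int} {t : List Int}
    (h : posF (colOf rows j) = v :: t) :
    (zeroFirst rows j).1 = some v ∧
    posF (colOf (zeroFirst rows j).2 j) = t ∧
    ∀ j', j' ≠ j → colOf (zeroFirst rows j).2 j' = colOf rows j' := by
  induction rows with
  | nil => simp [posF, colOf] at h
  | cons r rs ih =>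
    rw [colOf_cons] at h
    by_cases hp : 0 < r.getD j 0
    · rw [posF_cons_pos _ hp] at h
      injection h with hv ht
      refine ⟨?_, ?_, ?_⟩
      · rw [zeroFirst_cons, if_pos hp]
        show some (r.getD j 0) = some v
        rw [hv]
      · rw [zeroFirst_cons, if_pos hp]
        show posF (colOf (r.set j 0 :: rs) j) = t
        rw [colOf_cons, getD_set_self, posF_cons_nonpos _ (by omega), ht]
      · intro j' hj'
        rw [zeroFirst_cons, if_pos hp]
        show colOf (r.set j 0 :: rs) j' = colOf (r :: rs) j'
        rw [colOf_cons, colOf_cons]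
        congr 1
        rw [List.getD_eq_getElem?_getD, List.getD_eq_getElem?_getD,
          List.getElem?_set_ne (Ne.symm hj')]
    · rw [posF_cons_nonpos _ hp] at h
      obtain ⟨h1, h2, h3⟩ := ih h
      refine ⟨?_, ?_, ?_⟩
      · rw [zeroFirst_cons, if_neg hp]
        exact h1
      · rw [zeroFirst_cons, if_neg hp]
        show posF (colOf (r :: (zeroFirst rs j).2) j) = t
        rw [colOf_cons, posF_cons_nonpos _ hp]
        exact h2
      · intro j' hj'
        rw [zeroFirst_cons, if_neg hp]
        show colOf (r :: (zeroFirst rs j).2) j' = colOf (r :: rs) j'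
        rw [colOf_cons, colOf_cons, h3 j' hj']

lemma idx_some {w : Nat} {i : Int} (hw : 0 < w) (h1 : -((w : Int)) ≤ i) (h2 : i < (w : Int)) :
    PySem.List.pyIdx? w i = some (PySem.Int.mod i (w : Int)).toNat := by
  have hw' : (0 : Int) < (w : Int) := by exact_mod_cast hw
  rw [PySem.Int.mod_eq_emod_of_pos hw']
  unfold PySem.List.pyIdx?
  by_cases h0 : 0 ≤ i
  · rw [if_pos h0, if_pos (by omega)]
    rw [Int.emod_eq_of_lt h0 h2]
  · rw [if_neg h0, if_pos (by omega)]
    have hmod : i % (w : Int) = i + w := by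
      have h3 : (i + (w : Int) * 1) % (w : Int) = i % (w : Int) := Int.add_mul_emod_self_left i ((w : Int)) 1
      rw [mul_one] at h3
      rw [← h3, Int.emod_eq_of_lt (by omega) (by omega)]
    rw [hmod]
    congr 1
    omega

lemma mod_lt_w {w : Nat} (i : Int) (hw : 0 < w) :
    (PySem.Int.mod i (w : Int)).toNat < w := by
  rw [PySem.Int.mod_eq_emod_of_pos (by exact_mod_cast hw)]
  have := Int.emod_lt_of_pos i (show (0 : Int) < (w : Int) by exact_mod_cast hw)
  omega

lemma pyGetD_append_two (xs : List Int) (a b d : Int) :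
    PySem.List.pyGetD (xs ++ [a, b]) (-2) d = a := by
  have h : (xs ++ [a, b]) = (xs ++ [a]) ++ [b] := by simp
  rw [h, PySem.List.pyGetD_neg_ofNat ((xs ++ [a]) ++ [b]) 2 d (by omega) (by simp)]
  simp

lemma pyGet?_eq_getD {α : Type} (xs : List α) (d : α) {w : Nat} {i : Int}
    (hw : 0 < w) (hl : xs.length = w) (h1 : -((w : Int)) ≤ i) (h2 : i < (w : Int)) :
    PySem.List.pyGet? xs i = some (xs.getD (PySem.Int.mod i (w : Int)).toNat d) := by
  have hidx : PySem.List.pyIdx? xs.length i = some (PySem.Int.mod i (w : Int)).toNat := by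
    rw [hl]; exact idx_some hw h1 h2
  simp [PySem.List.pyGet?, hidx, List.getD_eq_getElem?_getD,
    List.getElem?_eq_getElem (show (PySem.Int.mod i (w : Int)).toNat < xs.length by
      rw [hl]; exact mod_lt_w _ hw)]

lemma pySetD_eq {α : Type} (xs : List α) (v : α) {w : Nat} {i : Int}
    (hw : 0 < w) (hl : xs.length = w) (h1 : -((w : Int)) ≤ i) (h2 : i < (w : Int)) :
    PySem.List.pySetD xs i v = xs.set (PySem.Int.mod i (w : Int)).toNat v := by
  have hidx : PySem.List.pyIdx? xs.length i = some (PySem.Int.mod i (w : Int)).toNat := by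
    rw [hl]; exact idx_some hw h1 h2
  simp [PySem.List.pySetD, PySem.List.pySet?, hidx]

lemma scanPick_cons (r : List Int) (rs : List (List Int)) (i : Int) :
    scanPick (r :: rs) i =
      if 0 < (PySem.List.pyGet? r i).getD 0 then
        (some ((PySem.List.pyGet? r i).getD 0), PySem.List.pySetD r i 0 :: rs)
      else ((scanPick rs i).1, r :: (scanPick rs i).2) := rfl

-- on a rectangular grid, B's Python-indexed scan is the Nat-indexed zeroFirst
lemma scanPick_eq_zeroFirst {w : Nat} {i : Int} (hw : 0 < w)
    (h1 : -((w : Int)) ≤ i) (h2 : i < (w : Int)) :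
    ∀ rows : List (List Int), (∀ r ∈ rows, r.length = w) →
      scanPick rows i = zeroFirst rows (PySem.Int.mod i (w : Int)).toNat := by
  intro rows
  induction rows with
  | nil => intro _; rfl
  | cons r rs ih =>
    intro hrect
    rw [scanPick_cons, zeroFirst_cons,
      pyGet?_eq_getD r 0 hw (hrect r (by simp)) h1 h2,
      pySetD_eq r 0 hw (hrect r (by simp)) h1 h2, Option.getD_some,
      ih (fun x hx => hrect x (List.mem_cons_of_mem _ hx))]

lemma zeroFirst_length {w : Nat} {j : Nat} :
    ∀ rows : List (List Int), (∀ r ∈ rows, r.length = w) →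
      ∀ r ∈ (zeroFirst rows j).2, r.length = w := by
  intro rows
  induction rows with
  | nil => intro _ r hr; simp [zeroFirst] at hr
  | cons r rs ih =>
    intro hrect x hx
    rw [zeroFirst_cons] at hx
    by_cases hp : 0 < r.getD j 0
    · rw [if_pos hp] at hx
      rcases List.mem_cons.mp hx with rfl | hx'
      · simp [hrect r (by simp)]
      · exact hrect x (List.mem_cons_of_mem _ hx')
    · rw [if_neg hp] at hx
      rcases List.mem_cons.mp hx with rfl | hx'
      · exact hrect x (by simp)
      · exact ih (fun y hy => hrect y (List.mem_cons_of_mem _ hy)) x hx'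

-- the two loop bodies move related states to related states with equal (pick, answer)
lemma step_rel {w : Nat} {bd grid : List (List Int)} (hRel : StateRel w bd grid)
    {stack : List Int} {ans m : Int}
    (hm : -((w : Int)) ≤ m - 1 ∧ m - 1 < (w : Int)) :
    (stepA (bd, stack, ans) m).2 = (stepB (grid, stack, ans) m).2 ∧
    StateRel w (stepA (bd, stack, ans) m).1 (stepB (grid, stack, ans) m).1 := by
  obtain ⟨hlen, hrect, hcol⟩ := hRel
  have hw : 0 < w := by by_contra h; push_cast [show w = 0 by omega] at hm; omega
  set n := (PySem.Int.mod (m - 1) (w : Int)).toNat with hn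
  have hnw : n < w := mod_lt_w _ hw
  have hget : PySem.List.pyGet? bd (m - 1) = some (bd.getD n []) :=
    pyGet?_eq_getD bd [] hw hlen hm.1 hm.2
  have hset : ∀ x, PySem.List.pySetD bd (m - 1) x = bd.set n x := fun x =>
    pySetD_eq bd x hw hlen hm.1 hm.2
  have hscan : scanPick grid (m - 1) = zeroFirst grid n :=
    scanPick_eq_zeroFirst hw hm.1 hm.2 grid hrect
  have hrect' : ∀ r ∈ (zeroFirst grid n).2, r.length = w := zeroFirst_length grid hrect
  rcases hposf : posF (colOf grid n) with _ | ⟨v, t⟩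
  · -- no positive cell in the column: both sides skip
    have hcoln : bd.getD n [] = [] := by rw [hcol n hnw, hposf]; rfl
    have hz := zeroFirst_none hposf
    have hA : stepA (bd, stack, ans) m = (bd, stack, ans) := by
      simp only [stepA, hget, hcoln]
      rw [if_neg (by simp)]
    have hB : stepB (grid, stack, ans) m = (grid, stack, ans) := by
      simp only [stepB, hscan, hz]
    rw [hA, hB]
    exact ⟨rfl, hlen, hrect, hcol⟩
  · -- first positive cell v is picked on both sides
    obtain ⟨hz1, hz2, hz3⟩ := zeroFirst_pos hposf
    have hcoln : bd.getD n [] = t.reverse ++ [v] := by rw [hcol n hnw, hposf]; simp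
    have hvtop : PySem.List.pyGetD (t.reverse ++ [v]) (-1) 0 = v :=
      PySem.List.pyGetD_neg_one_append_singleton _ _ _
    have hdrop : (t.reverse ++ [v]).dropLast = t.reverse := by simp
    have hRel' : StateRel w (bd.set n t.reverse) (zeroFirst grid n).2 := by
      refine ⟨by simp [hlen], hrect', fun j hj => ?_⟩
      by_cases hjn : j = n
      · subst hjn
        rw [List.getD_eq_getElem?_getD, List.getElem?_set_self (hlen ▸ hj), hz2]
        simp
      · rw [List.getD_eq_getElem?_getD, List.getElem?_set_ne (Ne.symm hjn),
          ← List.getD_eq_getElem?_getD, hz3 j hjn]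
        exact hcol j hj
    have hA : stepA (bd, stack, ans) m =
        (if (stack ++ [v]).length > 1 ∧
            PySem.List.pyGetD (stack ++ [v]) (-2) 0 = PySem.List.pyGetD (stack ++ [v]) (-1) 0
         then (bd.set n t.reverse, ((stack ++ [v]).dropLast).dropLast, ans + 2)
         else (bd.set n t.reverse, stack ++ [v], ans)) := by
      simp only [stepA, hget, hcoln]
      rw [if_pos (show (t.reverse ++ [v]).length > 0 by simp)]
      rw [hvtop, hset, hdrop]
    have hB : stepB (grid, stack, ans) m =
        (if stack ≠ [] ∧ PySem.List.pyGetD stack (-1) 0 = v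
         then ((zeroFirst grid n).2, stack.dropLast, ans + 2)
         else ((zeroFirst grid n).2, stack ++ [v], ans)) := by
      simp only [stepB, hscan, hz1]
    have hcond : ((stack ++ [v]).length > 1 ∧
        PySem.List.pyGetD (stack ++ [v]) (-2) 0 = PySem.List.pyGetD (stack ++ [v]) (-1) 0)
        ↔ (stack ≠ [] ∧ PySem.List.pyGetD stack (-1) 0 = v) := by
      constructor
      · rintro ⟨hl, he⟩
        have hne : stack ≠ [] := by intro hh; subst hh; simp at hl
        rcases List.eq_nil_or_concat stack with rfl | ⟨s, u, hsu⟩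
        · exact absurd rfl hne
        rw [List.concat_eq_append] at hsu
        subst hsu
        refine ⟨by simp, ?_⟩
        rw [PySem.List.pyGetD_neg_one_append_singleton]
        rw [PySem.List.pyGetD_neg_one_append_singleton, List.append_assoc] at he
        rw [show [u] ++ [v] = [u, v] from rfl, pyGetD_append_two] at he
        exact he
      · rintro ⟨hne, he⟩
        rcases List.eq_nil_or_concat stack with rfl | ⟨s, u, hsu⟩
        · exact absurd rfl hne
        rw [List.concat_eq_append] at hsu
        subst hsu
        rw [PySem.List.pyGetD_neg_one_append_singleton] at he
        refine ⟨by simp, ?_⟩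
        rw [PySem.List.pyGetD_neg_one_append_singleton, List.append_assoc,
          show [u] ++ [v] = [u, v] from rfl, pyGetD_append_two]
        exact he
    rw [hA, hB]
    by_cases hc : stack ≠ [] ∧ PySem.List.pyGetD stack (-1) 0 = v
    · rw [if_pos (hcond.mpr hc), if_pos hc]
      exact ⟨by simp, hRel'⟩
    · rw [if_neg (fun hh => hc (hcond.mp hh)), if_neg hc]
      exact ⟨rfl, hRel'⟩

lemma fold_rel {w : Nat} (moves : List Int) :
    ∀ (bd grid : List (List Int)) (stack : List Int) (ans : Int),
      StateRel w bd grid →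
      (∀ m ∈ moves, -((w : Int)) ≤ m - 1 ∧ m - 1 < (w : Int)) →
      (moves.foldl stepA (bd, stack, ans)).2 =
      (moves.foldl stepB (grid, stack, ans)).2 := by
  induction moves with
  | nil => intro _ _ _ _ _ _; rfl
  | cons m ms ih =>
    intro bd grid stack ans hRel hm
    obtain ⟨heq, hRel'⟩ := step_rel hRel (hm m (by simp))
    simp only [List.foldl_cons]
    have hA : stepA (bd, stack, ans) m =
        ((stepA (bd, stack, ans) m).1, (stepB (grid, stack, ans) m).2) := by
      rw [← heq]
    rw [hA]
    exact ih _ _ _ _ hRel' (fun x hx => hm x (List.mem_cons_of_mem _ hx))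

lemma getD_map_posF (l : List (List Int)) (j : Nat) :
    (l.map posF).getD j [] = posF (l.getD j []) := by
  conv_lhs => rw [show ([] : List Int) = posF [] from rfl]
  exact List.getD_map l [] posF

lemma init_rel (board : List (List Int)) :
    ((pyRotate board).map (fun row => row.filter (fun k => decide (k > 0)))).length
        = widthOf board ∧
      ∀ j < widthOf board,
        ((pyRotate board).map (fun row => row.filter (fun k => decide (k > 0)))).getD j []
          = (posF (colOf board j)).reverse := by
  constructor
  · simp [pyRotate, widthOf_reverse]
  · intro j hj
    have hjlen : j < (List.range (widthOf board.reverse)).length := by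
      simpa [widthOf_reverse] using hj
    have hrot : (pyRotate board).getD j [] = board.reverse.map (fun r => r.getD j 0) := by
      simp only [pyRotate, List.getD_eq_getElem?_getD, List.getElem?_map]
      rw [List.getElem?_eq_getElem hjlen]
      simp
    show ((pyRotate board).map posF).getD j [] = (posF (colOf board j)).reverse
    rw [getD_map_posF, hrot, List.map_reverse]
    simp only [posF, colOf, List.filter_reverse]

lemma widthOf_mem {board : List (List Int)} (h : board ≠ []) :
    ∃ r ∈ board, r.length = widthOf board := by
  induction board with
  | nil => cases h rfl
  | cons r rs ih =>
    cases rs with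
    | nil => exact ⟨r, by simp, rfl⟩
    | cons r' rs' =>
      obtain ⟨s, hs, hsw⟩ := ih (by simp)
      rw [widthOf_cons₂]
      rcases le_total r.length (widthOf (r' :: rs')) with hle | hle
      · exact ⟨r, by simp, by omega⟩
      · exact ⟨s, List.mem_cons_of_mem _ hs, by omega⟩

-- ===== VERDICT (by name: the statement is the Claim_ definition above) =====
theorem solution_spec : Claim_equal_solution := by
  intro board moves _ hpre
  show solution board moves = solution_alt board moves
  cases moves with
  | nil => rfl
  | cons m ms =>
    obtain ⟨hne, hrows⟩ := hpre m (by simp)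
    obtain ⟨r0, hr0, hr0w⟩ := widthOf_mem hne
    have hL : (board.headD []).length = widthOf board := by
      rw [← (hrows r0 hr0).1]; exact hr0w
    have hrect : ∀ r ∈ board, r.length = widthOf board := fun r hr =>
      ((hrows r hr).1).trans hL
    have hm : ∀ x ∈ m :: ms,
        -((widthOf board : Int)) ≤ x - 1 ∧ x - 1 < (widthOf board : Int) := by
      intro x hx
      obtain ⟨_, hrows'⟩ := hpre x hx
      have hb := (hrows' r0 hr0).2
      rw [hr0w] at hb
      exact hb
    simp only [solution, solution_alt, List.map_id']
    exact congrArg Prod.snd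
      (fold_rel (m :: ms) _ board [] 0
        ⟨(init_rel board).1, hrect, (init_rel board).2⟩ hm)
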